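-- pv_equiv track=rewrite | github.com/zhuwenzhen/algorithms-practice | Math/MinimumSubmatrix.py | minimumSubmatrix
-- ===== SOURCE A (Python) =====
-- def minimumSubmatrix(arr):
--     r, c = len(arr), len(arr[0])
--     dp = [[0 for _ in range(c)] for _ in range(c)]
--     mn, init = 0, False
--     for i in range(r):
--         for j in range(c):
--             sum = 0
--             for k in range(j, -1, -1):
--                 sum += arr[i][k]
--                 tmp = dp[k][j] + sum
--                 dp[k][j] = min(0, tmp)
--                 if not init or tmp < mn:
--                     init = True
--                     mn = tmp
--     return mn
-- ===== SOURCE B (Python) =====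
-- def minimumSubmatrix(arr):
--     r, c = len(arr), len(arr[0])
--     best = None
--     for left in range(c):
--         rowsum = [0] * r
--         for right in range(left, c):
--             running = 0
--             for i in range(r):
--                 rowsum[i] += arr[i][right]
--                 running = rowsum[i] + min(running, 0)
--                 if best is None or running < best:
--                     best = running
--     return 0 if best is None else best
-- ===== Notes on version B (the rewrite author's own statement) =====
-- stated objective: alternative
-- what changed: Replaces the per-row rescan with a 2D c*c dp table by the classic fix-column-pair method: columns (left,right) in the outer loops, a persistent 1D rowsum array per left, and a scalar Kadane over rows; same O(r*c^2) cost with the dp table and its reads/writes removed.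
import Mathlib
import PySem

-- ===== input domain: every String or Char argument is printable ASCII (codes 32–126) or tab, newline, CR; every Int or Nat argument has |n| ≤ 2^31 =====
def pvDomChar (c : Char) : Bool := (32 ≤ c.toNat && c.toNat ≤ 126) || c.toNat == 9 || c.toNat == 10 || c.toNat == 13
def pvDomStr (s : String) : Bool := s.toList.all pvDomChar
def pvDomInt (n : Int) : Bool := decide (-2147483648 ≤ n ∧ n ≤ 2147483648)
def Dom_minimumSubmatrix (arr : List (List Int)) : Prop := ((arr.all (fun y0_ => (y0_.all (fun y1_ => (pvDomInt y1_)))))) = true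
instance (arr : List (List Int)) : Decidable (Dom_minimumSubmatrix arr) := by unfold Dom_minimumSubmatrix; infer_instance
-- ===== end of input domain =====

-- B replaces A's per-row rescan with the fix-column-pair method (columns outer, a 1D rowsum
-- array and a scalar Kadane over rows), dropping A's c×c dp table; equivalence of return values.

-- ===== PORT A =====
-- arr[i][k] / dp[k][j] reads and writes; under Pre_ every index is in range, where getD/set are exact.
def aGet (arr : List (List Int)) (i k : Nat) : Int := (arr.getD i []).getD k 0

def dpGet (dp : List (List Int)) (k j : Nat) : Int := (dp.getD k []).getD j 0

def dpSet (dp : List (List Int)) (k j : Nat) (v : Int) : List (List Int) :=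
  dp.set k ((dp.getD k []).set j v)

-- body of A's innermost loop 'for k in range(j, -1, -1)'; state (sum, dp, mn, init)
def stepK (arr : List (List Int)) (i j : Nat)
    (q : Int × List (List Int) × Int × Bool) (k : Nat) :
    Int × List (List Int) × Int × Bool :=
  let sum := q.1 + aGet arr i k
  let tmp := dpGet q.2.1 k j + sum
  let dp' := dpSet q.2.1 k j (min 0 tmp)
  if q.2.2.2 = false ∨ tmp < q.2.2.1 then (sum, dp', tmp, true)
  else (sum, dp', q.2.2.1, q.2.2.2)

-- body of 'for j in range(c)': runs the k-loop with sum = 0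
def stepJ (arr : List (List Int)) (i : Nat)
    (st : List (List Int) × Int × Bool) (j : Nat) : List (List Int) × Int × Bool :=
  (((List.range (j+1)).reverse).foldl (stepK arr i j) (0, st)).2

-- body of 'for i in range(r)'
def stepI (arr : List (List Int)) (c : Nat)
    (st : List (List Int) × Int × Bool) (i : Nat) : List (List Int) × Int × Bool :=
  (List.range c).foldl (stepJ arr i) st

def minimumSubmatrix (arr : List (List Int)) : Int :=
  let r := arr.length
  let c := (arr.getD 0 []).length
  ((List.range r).foldl (stepI arr c)
    (List.replicate c (List.replicate c (0 : Int)), 0, false)).2.1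

-- ===== PORT B =====
-- body of B's 'for i in range(r)': state (rowsum, running, best)
def bStepI (arr : List (List Int)) (right : Nat)
    (t : List Int × Int × Option Int) (i : Nat) : List Int × Int × Option Int :=
  let rs := t.1.set i (t.1.getD i 0 + aGet arr i right)
  let running := rs.getD i 0 + min t.2.1 0
  let best' := match t.2.2 with
    | none => some running
    | some b => if running < b then some running else some b
  (rs, running, best')

-- body of 'for right in range(left, c)': running resets to 0; state (rowsum, best)
def bStepR (arr : List (List Int)) (r : Nat)
    (q : List Int × Option Int) (right : Nat) : List Int × Option Int :=
  let t := (List.range r).foldl (bStepI arr right) (q.1, 0, q.2)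
  (t.1, t.2.2)

-- body of 'for left in range(c)': rowsum resets to [0]*r
def bStepL (arr : List (List Int)) (r c : Nat)
    (best : Option Int) (left : Nat) : Option Int :=
  ((List.range' left (c - left)).foldl (bStepR arr r) (List.replicate r 0, best)).2

def minimumSubmatrix_alt (arr : List (List Int)) : Int :=
  let r := arr.length
  let c := (arr.getD 0 []).length
  ((List.range c).foldl (bStepL arr r c) none).getD 0

-- ===== PRECONDITION & SPEC =====
-- A raises IndexError exactly when arr is empty (arr[0]) or some row is shorter than row 0
-- (arr[i][k] for k < len(arr[0])); Pre_ excludes exactly those inputs.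
def Pre_minimumSubmatrix (arr : List (List Int)) : Prop :=
  arr ≠ [] ∧ ∀ row ∈ arr, (arr.getD 0 []).length ≤ row.length

instance (arr : List (List Int)) : Decidable (Pre_minimumSubmatrix arr) := by
  unfold Pre_minimumSubmatrix; infer_instance

def pvWitness_minimumSubmatrix : List (List Int) := [[1, -2], [3, -4]]

def Spec_minimumSubmatrix (arr : List (List Int)) (out : Int) : Prop := out = minimumSubmatrix_alt arr
instance (arr : List (List Int)) (out : Int) : Decidable (Spec_minimumSubmatrix arr out) := by unfold Spec_minimumSubmatrix; infer_instance

-- ===== CLAIM (what is proved, stated in full; the proofs are below) =====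
def Claim_equal_minimumSubmatrix : Prop := ∀ (arr : List (List Int)), Dom_minimumSubmatrix arr → Pre_minimumSubmatrix arr → Spec_minimumSubmatrix arr (minimumSubmatrix arr)

-- ===== LEMMAS AND PROOFS =====

-- sum of n entries of row i starting at column k
def csum (arr : List (List Int)) (i k n : Nat) : Int :=
  ((List.range' k n).map (aGet arr i)).sum

-- sum of row i over columns k..j
def colsum (arr : List (List Int)) (i k j : Nat) : Int := csum arr i k (j + 1 - k)

-- minimal sum of a rectangle over columns k..j whose last row is i ("Kadane value")
def gval (arr : List (List Int)) (k j : Nat) : Nat → Int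
  | 0 => colsum arr 0 k j
  | i + 1 => colsum arr (i+1) k j + min 0 (gval arr k j i)

-- the previous row's Kadane value (0 before the first row)
def prevRun (arr : List (List Int)) (k j : Nat) : Nat → Int
  | 0 => 0
  | i + 1 => gval arr k j i

-- what dp[k][j] holds after i full rows of A
def pm (arr : List (List Int)) (k j i : Nat) : Int := min 0 (prevRun arr k j i)

-- the running-minimum update both programs perform, on an Option accumulator
def omin (o : Option Int) (v : Int) : Option Int :=
  match o with
  | none => some v
  | some m => some (min m v)

-- A's (mn, init) state as a function of the Option accumulator
def enc (o : Option Int) : Int × Bool := (o.getD 0, o.isSome)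

-- contents of dp during A's run: row i, column j, entries k ≥ thr of column j updated
def dpFun (arr : List (List Int)) (i j thr : Nat) (k j' : Nat) : Int :=
  if k ≤ j' then (if j' < j ∨ (j' = j ∧ thr ≤ k) then pm arr k j' (i+1) else pm arr k j' i) else 0

-- contents of dp between columns: columns < jd done for row i
def dpCol (arr : List (List Int)) (i jd : Nat) (k j' : Nat) : Int :=
  if k ≤ j' then (if j' < jd then pm arr k j' (i+1) else pm arr k j' i) else 0

def DpAt (c : Nat) (dp : List (List Int)) (f : Nat → Nat → Int) : Prop :=
  dp.length = c ∧ (∀ k, k < c → (dp.getD k []).length = c) ∧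
    ∀ k j, k < c → j < c → dpGet dp k j = f k j

def RsAt (r : Nat) (rs : List Int) (f : Nat → Int) : Prop :=
  rs.length = r ∧ ∀ i, i < r → rs.getD i 0 = f i

-- all Kadane values in A's traversal order
def valsA (arr : List (List Int)) : List Int :=
  (List.range arr.length).flatMap fun i =>
    (List.range (arr.getD 0 []).length).flatMap fun j =>
      ((List.range (j+1)).reverse).map fun k => gval arr k j i

-- all Kadane values in B's traversal order
def valsB (arr : List (List Int)) : List Int :=
  (List.range (arr.getD 0 []).length).flatMap fun left =>
    (List.range' left ((arr.getD 0 []).length - left)).flatMap fun right =>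
      (List.range arr.length).map (gval arr left right)

lemma csum_succ_left (arr : List (List Int)) (i k n : Nat) :
    csum arr i k (n+1) = aGet arr i k + csum arr i (k+1) n := by
  simp [csum, List.range'_succ]

lemma csum_succ_right (arr : List (List Int)) (i k n : Nat) :
    csum arr i k (n+1) = csum arr i k n + aGet arr i (k+n) := by
  simp [csum, List.range'_concat]

lemma gval_eq (arr : List (List Int)) (k j i : Nat) :
    gval arr k j i = colsum arr i k j + pm arr k j i := by
  cases i <;> simp [gval, pm, prevRun]

lemma omin_right_comm (o : Option Int) (a b : Int) :
    omin (omin o a) b = omin (omin o b) a := by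
  cases o <;> simp [omin, min_comm, min_left_comm]

lemma foldl_omin_perm {l₁ l₂ : List Int} (p : l₁.Perm l₂) :
    ∀ o, l₁.foldl omin o = l₂.foldl omin o := by
  induction p with
  | nil => intro o; rfl
  | cons x _ ih => intro o; simp [List.foldl, ih]
  | swap x y l => intro o; simp [List.foldl, omin_right_comm]
  | trans _ _ ih₁ ih₂ => intro o; rw [ih₁, ih₂]

lemma enc_if (o : Option Int) (v s : Int) (d : List (List Int)) :
    (if (enc o).2 = false ∨ v < (enc o).1 then (s, d, v, true)
     else (s, d, (enc o).1, (enc o).2)) = (s, d, enc (omin o v)) := by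
  cases o with
  | none => simp [enc, omin]
  | some m =>
      by_cases h : v < m <;> simp [enc, omin, h] <;> omega

lemma omin_match (o : Option Int) (v : Int) :
    (match o with
     | none => some v
     | some b => if v < b then some v else some b) = omin o v := by
  cases o with
  | none => rfl
  | some b => by_cases h : v < b <;> simp [omin, h] <;> omega

lemma DpAt_congr {c : Nat} {dp : List (List Int)} {f g : Nat → Nat → Int}
    (h : DpAt c dp f) (hfg : ∀ k j, k < c → j < c → f k j = g k j) : DpAt c dp g := by
  exact ⟨h.1, h.2.1, fun k j hk hj => (h.2.2 k j hk hj).trans (hfg k j hk hj)⟩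

lemma getD_set_self {α : Type} {l : List α} {k : Nat} (hk : k < l.length) (x d : α) :
    (l.set k x).getD k d = x := by
  rw [List.getD_eq_getElem?_getD, List.getElem?_set_self (by omega)]; rfl

lemma getD_set_ne {α : Type} {l : List α} {k k' : Nat} (h : k ≠ k') (x d : α) :
    (l.set k x).getD k' d = l.getD k' d := by
  rw [List.getD_eq_getElem?_getD, List.getElem?_set_ne h, ← List.getD_eq_getElem?_getD]

lemma dpGet_dpSet {dp : List (List Int)} {k j : Nat} (hk : k < dp.length)
    (hj : j < (dp.getD k []).length) (v : Int) (k' j' : Nat) :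
    dpGet (dpSet dp k j v) k' j' = if k' = k ∧ j' = j then v else dpGet dp k' j' := by
  unfold dpGet dpSet
  by_cases h : k' = k
  · subst h
    rw [getD_set_self hk]
    by_cases h2 : j' = j
    · subst h2; rw [getD_set_self hj]; simp
    · rw [getD_set_ne (by omega)]; simp [h2]
  · rw [getD_set_ne (by omega)]; simp [h]

lemma DpAt_dpSet {c : Nat} {dp : List (List Int)} {f : Nat → Nat → Int}
    (h : DpAt c dp f) {k j : Nat} (hk : k < c) (hj : j < c) (v : Int) :
    DpAt c (dpSet dp k j v) (fun k' j' => if k' = k ∧ j' = j then v else f k' j') := by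
  obtain ⟨h1, h2, h3⟩ := h
  have hk' : k < dp.length := by omega
  have hj' : j < (dp.getD k []).length := by rw [h2 k hk]; omega
  refine ⟨by simp [dpSet, h1], ?_, ?_⟩
  · intro k2 hk2
    by_cases e : k2 = k
    · subst e
      rw [dpSet, getD_set_self hk', List.length_set]
      exact h2 k2 hk2
    · rw [dpSet, getD_set_ne (by omega)]
      exact h2 _ hk2
  · intro k2 j2 hk2 hj2
    rw [dpGet_dpSet hk' hj' v]
    by_cases e : k2 = k ∧ j2 = j
    · simp [e]
    · simp [e, h3 k2 j2 hk2 hj2]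

-- A's innermost loop: processes k = k0+n-1 … k0 of column j
lemma A_inner (arr : List (List Int)) (i j c : Nat) (hj : j < c) :
    ∀ n k0, k0 + n = j + 1 →
    ∀ dp o, DpAt c dp (dpFun arr i j (k0+n)) →
    ∃ dp', ((List.range' k0 n).reverse).foldl (stepK arr i j)
        (csum arr i (k0+n) (j+1-(k0+n)), dp, enc o)
      = (csum arr i k0 (j+1-k0), dp',
          enc ((((List.range' k0 n).reverse).map (fun k => gval arr k j i)).foldl omin o))
      ∧ DpAt c dp' (dpFun arr i j k0) := by
  intro n
  induction n with
  | zero =>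
      intro k0 hk dp o hdp
      exact ⟨dp, by simp, hdp⟩
  | succ n ih =>
      intro k0 hk dp o hdp
      have hk0j : k0 ≤ j := by omega
      have hk0c : k0 < c := by omega
      have hdp0 : DpAt c dp (dpFun arr i j (k0+1+n)) := by
        apply DpAt_congr hdp; intro k' j' _ _
        have : k0 + (n+1) = k0+1+n := by omega
        rw [this]
      obtain ⟨dp', hfold, hdp2⟩ := ih (k0+1) (by omega) dp o hdp0
      have hsplit : (List.range' k0 (n+1)).reverse
          = (List.range' (k0+1) n).reverse ++ [k0] := by
        rw [List.range'_succ]; simp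
      have e1 : csum arr i (k0+(n+1)) (j+1-(k0+(n+1))) = csum arr i (k0+1+n) (j+1-(k0+1+n)) := by
        have : k0 + (n+1) = k0+1+n := by omega
        rw [this]
      rw [hsplit, List.foldl_append, e1, hfold]
      -- the single step at k = k0
      have hsum : csum arr i (k0+1) (j+1-(k0+1)) + aGet arr i k0 = csum arr i k0 (j+1-k0) := by
        have h1 : j+1-k0 = (j-k0)+1 := by omega
        have h2 : j+1-(k0+1) = j-k0 := by omega
        rw [h1, h2, csum_succ_left, add_comm]
      have hget : dpGet dp' k0 j = pm arr k0 j i := by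
        rw [hdp2.2.2 k0 j hk0c hj]
        simp [dpFun, hk0j]
      have htmp : dpGet dp' k0 j + csum arr i k0 (j+1-k0) = gval arr k0 j i := by
        rw [hget, gval_eq arr k0 j i, add_comm]; rfl
      refine ⟨dpSet dp' k0 j (min 0 (gval arr k0 j i)), ?_, ?_⟩
      · simp only [List.foldl_cons, List.foldl_nil, stepK, hsum, htmp]
        rw [enc_if]
        simp [List.map_append]
      · have := DpAt_dpSet hdp2 hk0c hj (min 0 (gval arr k0 j i))
        apply DpAt_congr this
        intro k' j' hk' hj'
        by_cases e : k' = k0 ∧ j' = j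
        · obtain ⟨e1, e2⟩ := e; subst e1; subst e2
          simp [dpFun, hk0j, pm, prevRun]
        · simp only [e, if_false]
          unfold dpFun
          split_ifs <;> first | rfl | omega

-- A's middle loop over columns j0 … j0+m-1 of row i
lemma A_cols (arr : List (List Int)) (i c : Nat) :
    ∀ m j0, j0 + m = c →
    ∀ dp o, DpAt c dp (dpCol arr i j0) →
    ∃ dp', (List.range' j0 m).foldl (stepJ arr i) (dp, enc o)
      = (dp', enc (((List.range' j0 m).flatMap (fun j =>
            ((List.range (j+1)).reverse).map (fun k => gval arr k j i))).foldl omin o))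
      ∧ DpAt c dp' (dpCol arr i (j0+m)) := by
  intro m
  induction m with
  | zero =>
      intro j0 h dp o hdp
      exact ⟨dp, by simp, by simpa using hdp⟩
  | succ m ih =>
      intro j0 h dp o hdp
      have hj0 : j0 < c := by omega
      rw [List.range'_succ, List.foldl_cons]
      have hdp' : DpAt c dp (dpFun arr i j0 (0 + (j0+1))) := by
        apply DpAt_congr hdp; intro k' j' hk' hj'
        unfold dpCol dpFun
        split_ifs <;> first | rfl | omega
      obtain ⟨dp', hfold, hdp2⟩ := A_inner arr i j0 c hj0 (j0+1) 0 (by omega) dp o hdp'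
      have hstep : stepJ arr i (dp, enc o) j0
          = (dp', enc ((((List.range (j0+1)).reverse).map (fun k => gval arr k j0 i)).foldl omin o)) := by
        unfold stepJ
        rw [List.range_eq_range']
        have e0 : ((0:Int), (dp, enc o))
            = (csum arr i (0+(j0+1)) (j0+1-(0+(j0+1))), dp, enc o) := by
          simp [csum]
        rw [e0, hfold]
      rw [hstep]
      have hdp2' : DpAt c dp' (dpCol arr i (j0+1)) := by
        apply DpAt_congr hdp2; intro k' j' hk' hj'
        unfold dpFun dpCol
        split_ifs <;> first | rfl | omega
      obtain ⟨dp'', hfold2, hdp3⟩ := ih (j0+1) (by omega) dp' _ hdp2'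
      refine ⟨dp'', ?_, by simpa [Nat.add_assoc, Nat.add_comm, Nat.add_left_comm] using hdp3⟩
      rw [hfold2, List.flatMap_cons, List.foldl_append]

-- A's outer loop over rows i0 … i0+m-1
lemma A_rows (arr : List (List Int)) (c : Nat) :
    ∀ m i0 dp o, DpAt c dp (dpCol arr i0 0) →
    ∃ dp', (List.range' i0 m).foldl (stepI arr c) (dp, enc o)
      = (dp', enc (((List.range' i0 m).flatMap (fun i =>
            (List.range c).flatMap (fun j =>
              ((List.range (j+1)).reverse).map (fun k => gval arr k j i)))).foldl omin o))
      ∧ DpAt c dp' (dpCol arr (i0+m) 0) := by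
  intro m
  induction m with
  | zero =>
      intro i0 dp o hdp
      exact ⟨dp, by simp, by simpa using hdp⟩
  | succ m ih =>
      intro i0 dp o hdp
      rw [List.range'_succ, List.foldl_cons]
      obtain ⟨dp', hfold, hdp2⟩ := A_cols arr i0 c c 0 (by omega) dp o (by simpa using hdp)
      have hstep : stepI arr c (dp, enc o) i0
          = (dp', enc (((List.range c).flatMap (fun j =>
              ((List.range (j+1)).reverse).map (fun k => gval arr k j i0))).foldl omin o)) := by
        unfold stepI
        rw [← List.range_eq_range'] at hfold
        exact hfold
      rw [hstep]
      have hdp2' : DpAt c dp' (dpCol arr (i0+1) 0) := by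
        apply DpAt_congr hdp2; intro k' j' hk' hj'
        unfold dpCol
        split_ifs <;> first | rfl | omega
      obtain ⟨dp'', hfold2, hdp3⟩ := ih (i0+1) dp' _ hdp2'
      refine ⟨dp'', ?_, by simpa [Nat.add_assoc, Nat.add_comm, Nat.add_left_comm] using hdp3⟩
      rw [hfold2, List.flatMap_cons, List.foldl_append]

lemma dp_init (arr : List (List Int)) (c : Nat) :
    DpAt c (List.replicate c (List.replicate c (0:Int))) (dpCol arr 0 0) := by
  refine ⟨by simp, ?_, ?_⟩
  · intro k hk
    rw [List.getD_eq_getElem?_getD, List.getElem?_replicate]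
    simp [hk]
  · intro k j hk hj
    unfold dpGet dpCol
    simp only [List.getD_eq_getElem?_getD, List.getElem?_replicate]
    simp only [hk, if_true, Option.getD_some, List.getElem?_replicate, hj]
    split_ifs <;> first | omega | simp [pm, prevRun]

lemma A_eq (arr : List (List Int)) :
    minimumSubmatrix arr = ((valsA arr).foldl omin none).getD 0 := by
  obtain ⟨dp', hfold, -⟩ := A_rows arr ((arr.getD 0 []).length) arr.length 0
    (List.replicate ((arr.getD 0 []).length) (List.replicate ((arr.getD 0 []).length) (0:Int)))
    none (dp_init arr _)
  rw [← List.range_eq_range'] at hfold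
  show (List.foldl (stepI arr ((arr.getD 0 []).length))
      (List.replicate ((arr.getD 0 []).length) (List.replicate ((arr.getD 0 []).length) (0:Int)), enc none)
      (List.range arr.length)).2.1 = _
  rw [hfold]
  rfl

-- B's innermost loop (the scalar Kadane over rows)
lemma B_rows (arr : List (List Int)) (left right r : Nat) (hlr : left ≤ right) :
    ∀ m i0, i0 + m = r →
    ∀ rs o, RsAt r rs (fun i => if i < i0 then csum arr i left (right+1-left)
                               else csum arr i left (right-left)) →
    ∃ rs', (List.range' i0 m).foldl (bStepI arr right)
        (rs, prevRun arr left right i0, o)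
      = (rs', prevRun arr left right (i0+m),
          ((List.range' i0 m).map (gval arr left right)).foldl omin o)
      ∧ RsAt r rs' (fun i => if i < i0+m then csum arr i left (right+1-left)
                             else csum arr i left (right-left)) := by
  intro m
  induction m with
  | zero =>
      intro i0 h rs o hrs
      exact ⟨rs, by simp, by simpa using hrs⟩
  | succ m ih =>
      intro i0 h rs o hrs
      have hi0 : i0 < r := by omega
      have hlen : i0 < rs.length := by rw [hrs.1]; omega
      rw [List.range'_succ, List.foldl_cons, List.map_cons, List.foldl_cons]
      have hold : rs.getD i0 0 = csum arr i0 left (right-left) := by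
        rw [hrs.2 i0 hi0]; simp
      have hnew : rs.getD i0 0 + aGet arr i0 right = csum arr i0 left (right+1-left) := by
        rw [hold]
        have h1 : right+1-left = (right-left)+1 := by omega
        have h2 : aGet arr i0 right = aGet arr i0 (left+(right-left)) := by
          congr 1; omega
        rw [h1, h2, csum_succ_right]
      have hrun : (rs.set i0 (rs.getD i0 0 + aGet arr i0 right)).getD i0 0
            + min (prevRun arr left right i0) 0 = gval arr left right i0 := by
        rw [getD_set_self hlen, hnew, gval_eq]
        unfold colsum pm
        rw [min_comm]
      have hstep : bStepI arr right (rs, prevRun arr left right i0, o) i0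
          = (rs.set i0 (rs.getD i0 0 + aGet arr i0 right),
             gval arr left right i0, omin o (gval arr left right i0)) := by
        unfold bStepI
        simp only [omin_match, hrun]
      rw [hstep,
        show gval arr left right i0 = prevRun arr left right (i0+1) from rfl]
      have hrs' : RsAt r (rs.set i0 (rs.getD i0 0 + aGet arr i0 right))
          (fun i => if i < i0+1 then csum arr i left (right+1-left)
                    else csum arr i left (right-left)) := by
        refine ⟨by rw [List.length_set]; exact hrs.1, ?_⟩
        intro i hi
        by_cases e : i = i0
        · subst e; rw [getD_set_self hlen, hnew]; simp
        · rw [getD_set_ne (by omega), hrs.2 i hi]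
          by_cases e2 : i < i0
          · simp [e2, show i < i0+1 by omega]
          · simp [e2, show ¬(i < i0+1) by omega]
      obtain ⟨rs', hfold2, hrs2⟩ := ih (i0+1) (by omega) _
        (omin o (prevRun arr left right (i0+1))) hrs'
      rw [hfold2]
      have harith : i0 + (m+1) = i0+1+m := by omega
      rw [harith]
      exact ⟨rs', rfl, hrs2⟩

-- B's middle loop over right = right0 … c-1
lemma B_cols (arr : List (List Int)) (left r : Nat) :
    ∀ m right0, left ≤ right0 →
    ∀ rs o, RsAt r rs (fun i => csum arr i left (right0-left)) →
    ∃ rs', (List.range' right0 m).foldl (bStepR arr r) (rs, o)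
      = (rs', ((List.range' right0 m).flatMap (fun right =>
            (List.range r).map (gval arr left right))).foldl omin o)
      ∧ RsAt r rs' (fun i => csum arr i left ((right0+m)-left)) := by
  intro m
  induction m with
  | zero =>
      intro right0 hlr rs o hrs
      exact ⟨rs, by simp, by simpa using hrs⟩
  | succ m ih =>
      intro right0 hlr rs o hrs
      rw [List.range'_succ, List.foldl_cons]
      have hrs0 : RsAt r rs (fun i => if i < 0 then csum arr i left (right0+1-left)
                                      else csum arr i left (right0-left)) := by
        refine ⟨hrs.1, ?_⟩
        intro i hi; rw [hrs.2 i hi]; simp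
      obtain ⟨rs', hfold, hrs1⟩ := B_rows arr left right0 r hlr r 0 (by omega) rs o hrs0
      have hstep : bStepR arr r (rs, o) right0
          = (rs', ((List.range r).map (gval arr left right0)).foldl omin o) := by
        unfold bStepR
        rw [List.range_eq_range',
          show ((rs, o).1, (0:Int), (rs, o).2)
            = (rs, prevRun arr left right0 0, o) from rfl, hfold]
      rw [hstep]
      have hrs1' : RsAt r rs' (fun i => csum arr i left ((right0+1)-left)) := by
        refine ⟨hrs1.1, ?_⟩
        intro i hi
        have h1 : rs'.getD i 0 = if i < 0 + r then csum arr i left (right0+1-left)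
            else csum arr i left (right0-left) := hrs1.2 i hi
        rw [if_pos (show i < 0 + r by omega)] at h1
        exact h1
      obtain ⟨rs'', hfold2, hrs2⟩ := ih (right0+1) (by omega) rs' _ hrs1'
      rw [hfold2, List.flatMap_cons, List.foldl_append]
      have harith : right0+1+m = right0+(m+1) := by omega
      rw [harith] at hrs2
      exact ⟨rs'', rfl, hrs2⟩

-- B's outer loop over left
lemma B_lefts (arr : List (List Int)) (r c : Nat) :
    ∀ m l0, ∀ o, (List.range' l0 m).foldl (bStepL arr r c) o
      = ((List.range' l0 m).flatMap (fun left =>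
          (List.range' left (c-left)).flatMap (fun right =>
            (List.range r).map (gval arr left right)))).foldl omin o := by
  intro m
  induction m with
  | zero => intro l0 o; simp
  | succ m ih =>
      intro l0 o
      rw [List.range'_succ, List.foldl_cons]
      have hrepl : RsAt r (List.replicate r (0:Int)) (fun i => csum arr i l0 (l0-l0)) := by
        refine ⟨by simp, ?_⟩
        intro i hi
        rw [List.getD_eq_getElem?_getD, List.getElem?_replicate]
        simp [hi, csum]
      obtain ⟨rs', hfold, -⟩ := B_cols arr l0 r (c-l0) l0 (by omega)
        (List.replicate r 0) o hrepl
      have hstep : bStepL arr r c o l0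
          = ((List.range' l0 (c-l0)).flatMap (fun right =>
              (List.range r).map (gval arr l0 right))).foldl omin o := by
        unfold bStepL
        rw [hfold]
      rw [hstep, ih, List.flatMap_cons, List.foldl_append]

lemma B_eq (arr : List (List Int)) :
    minimumSubmatrix_alt arr = ((valsB arr).foldl omin none).getD 0 := by
  have h := B_lefts arr arr.length ((arr.getD 0 []).length) ((arr.getD 0 []).length) 0 none
  rw [← List.range_eq_range'] at h
  show ((List.range ((arr.getD 0 []).length)).foldl
      (bStepL arr arr.length ((arr.getD 0 []).length)) none).getD 0 = _
  rw [h]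
  rfl

-- triangle swap: {(k,j) : k ≤ j < c} enumerated j-outer vs k-outer
lemma triangle (F : Nat → Nat → Multiset Int) :
    ∀ c : Nat, ((List.range c : List Nat) : Multiset Nat).bind
        (fun j => ((List.range (j+1) : List Nat) : Multiset Nat).bind (fun k => F k j))
      = ((List.range c : List Nat) : Multiset Nat).bind
        (fun k => ((List.range' k (c-k) : List Nat) : Multiset Nat).bind (fun j => F k j)) := by
  intro c
  induction c with
  | zero => simp
  | succ c ih =>
      have e1 : ((List.range (c+1) : List Nat) : Multiset Nat)
          = ((List.range c : List Nat) : Multiset Nat) + (([c] : List Nat) : Multiset Nat) := by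
        rw [List.range_succ, ← Multiset.coe_add]
      have e2 : ∀ k, k < c → ((List.range' k (c+1-k) : List Nat) : Multiset Nat)
          = ((List.range' k (c-k) : List Nat) : Multiset Nat) + (([c] : List Nat) : Multiset Nat) := by
        intro k hk
        rw [show c+1-k = (c-k)+1 by omega, List.range'_concat,
          show k+1*(c-k) = c by omega, ← Multiset.coe_add]
      rw [e1, Multiset.add_bind, Multiset.add_bind]
      have e3 : ((([c] : List Nat) : Multiset Nat)).bind
          (fun j => ((List.range (j+1) : List Nat) : Multiset Nat).bind (fun k => F k j))
          = ((List.range c : List Nat) : Multiset Nat).bind (fun k => F k c) + F c c := by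
        simp only [Multiset.coe_singleton, Multiset.singleton_bind]
        rw [e1, Multiset.add_bind]
        simp
      have e4 : ((List.range c : List Nat) : Multiset Nat).bind
          (fun k => ((List.range' k (c+1-k) : List Nat) : Multiset Nat).bind (fun j => F k j))
          = ((List.range c : List Nat) : Multiset Nat).bind
              (fun k => ((List.range' k (c-k) : List Nat) : Multiset Nat).bind (fun j => F k j))
            + ((List.range c : List Nat) : Multiset Nat).bind (fun k => F k c) := by
        rw [← Multiset.bind_add]
        apply Multiset.bind_congr
        intro k hk
        have hk' : k < c := by
          rw [Multiset.mem_coe, List.mem_range] at hk; exact hk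
        rw [e2 k hk', Multiset.add_bind]
        simp
      have e5 : ((([c] : List Nat) : Multiset Nat)).bind
          (fun k => ((List.range' k (c+1-k) : List Nat) : Multiset Nat).bind (fun j => F k j))
          = F c c := by
        simp only [Multiset.coe_singleton, Multiset.singleton_bind]
        rw [show c+1-c = 1 by omega]
        simp [List.range'_one]
      rw [e3, e4, e5, ih]
      abel

lemma bind_map_swap (s t : Multiset Nat) (f : Nat → Nat → Int) :
    s.bind (fun i => t.map (fun k => f i k)) = t.bind (fun k => s.map (fun i => f i k)) := by
  simp only [← Multiset.bind_singleton]
  rw [Multiset.bind_bind]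

lemma vals_perm (arr : List (List Int)) : (valsA arr).Perm (valsB arr) := by
  rw [← Multiset.coe_eq_coe]
  unfold valsA valsB
  simp only [← Multiset.coe_bind, ← Multiset.map_coe, Multiset.coe_reverse]
  rw [Multiset.bind_bind]
  have lhs : ((List.range ((arr.getD 0 []).length) : List Nat) : Multiset Nat).bind
      (fun j => ((List.range arr.length : List Nat) : Multiset Nat).bind
        (fun i => Multiset.map (fun k => gval arr k j i)
          ((List.range (j+1) : List Nat) : Multiset Nat)))
      = ((List.range ((arr.getD 0 []).length) : List Nat) : Multiset Nat).bind
      (fun j => ((List.range (j+1) : List Nat) : Multiset Nat).bind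
        (fun k => Multiset.map (gval arr k j)
          ((List.range arr.length : List Nat) : Multiset Nat))) := by
    apply Multiset.bind_congr
    intro j _
    exact bind_map_swap _ _ _
  rw [lhs]
  exact triangle (fun k j => Multiset.map (gval arr k j)
    ((List.range arr.length : List Nat) : Multiset Nat)) _

-- ===== VERDICT (by name: the statement is the Claim_ definition above) =====
theorem minimumSubmatrix_spec : Claim_equal_minimumSubmatrix := by
  intro arr _ _
  unfold Spec_minimumSubmatrix
  rw [A_eq, B_eq, foldl_omin_perm (vals_perm arr)]
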